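-- pv_equiv track=rewrite | github.com/Jimmy-Lin/GeneralizedOptimalSparseDecisionTrees | python/model/rbinoct/learn_class_bin.py | get_binbin_ranges
-- ===== SOURCE A (Python) =====
-- BIN_MAP = dict()
--
-- def get_binbin_ranges(min, max):
--     if max <= min:
--         return []
--     if max - min <= 1:
--         return [[[], [min, min], [max, max]]]
--
--     if min == 0 and max in BIN_MAP:
--         return BIN_MAP[max]
--
--     #print min, max
--     mid = int(float(max - min) / 2.0)
--     #if mid - min >= max - mid - 1:
--     #    mid = mid - 1
--     result = [[[], [min, min + mid], [min + mid + 1, max]]]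
--     for i in get_binbin_ranges(min, min + mid):
--         result.extend([[[0] + i[0], i[1], i[2]]])
--     for i in get_binbin_ranges(min + mid + 1, max):
--         result.extend([[[1] + i[0], i[1], i[2]]])
--
--     if min == 0:
--         BIN_MAP[max] = result
--
--     return result
-- ===== SOURCE B (Python) =====
-- def get_binbin_ranges(min, max):
--     # Explicit-stack preorder iteration instead of recursion; no memo table.
--     result = []
--     stack = [(min, max, [])]
--     while stack:
--         lo, hi, path = stack.pop()
--         if hi <= lo:
--             continue
--         if hi - lo <= 1:
--             result.append([path, [lo, lo], [hi, hi]])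
--             continue
--         mid = int(float(hi - lo) / 2.0)
--         result.append([path, [lo, lo + mid], [lo + mid + 1, hi]])
--         stack.append((lo + mid + 1, hi, path + [1]))
--         stack.append((lo, lo + mid, path + [0]))
--     return result
-- ===== Notes on version B (the rewrite author's own statement) =====
-- stated objective: alternative
-- what changed: Replaces the recursion (which rebuilds each node's path by prepending 0/1 to every entry of the recursive result, and keeps a global memo dict) with a single explicit-stack preorder loop that carries the root-to-node path in the stack frame and appends each emitted triple once, dropping the BIN_MAP memoization.
import Mathlib
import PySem

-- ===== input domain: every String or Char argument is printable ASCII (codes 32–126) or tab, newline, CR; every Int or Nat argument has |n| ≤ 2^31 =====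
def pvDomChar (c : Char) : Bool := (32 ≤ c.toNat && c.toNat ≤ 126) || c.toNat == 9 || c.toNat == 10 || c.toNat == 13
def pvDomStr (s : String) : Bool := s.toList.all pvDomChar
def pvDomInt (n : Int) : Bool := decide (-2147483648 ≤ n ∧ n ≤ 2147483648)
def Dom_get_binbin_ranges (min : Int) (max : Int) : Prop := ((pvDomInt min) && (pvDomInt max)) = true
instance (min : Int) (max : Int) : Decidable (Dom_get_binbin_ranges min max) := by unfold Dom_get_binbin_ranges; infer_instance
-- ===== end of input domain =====

-- B replaces A's recursion (which prefixes 0/1 onto every path of each recursive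
-- result, plus a global memo dict that never changes output values) by one
-- explicit-stack preorder loop carrying the path in the frame; same values, no memo.
-- (A's BIN_MAP mutation is a side effect not modelled here; it never affects returns.)

-- ===== PORT A =====
-- mid = int(float(max-min)/2.0): max-min ≥ 2 here and ≤ 2^32 on Dom, so the float
-- division is exact and truncation = floor = Int ediv by 2; ported as (max - min) / 2.
-- i[0], i[1], i[2] are ported as getD: every element of the recursive result has
-- length 3, so indexing never raises and getD is exact there.
def get_binbin_ranges (min : Int) (max : Int) : List (List (List Int)) :=
  if _h1 : max ≤ min then []
  else if _h2 : max - min ≤ 1 then [[[], [min, min], [max, max]]]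
  else
    let mid := (max - min) / 2
    let result : List (List (List Int)) := [[[], [min, min + mid], [min + mid + 1, max]]]
    let result := (get_binbin_ranges min (min + mid)).foldl
      (fun r i => r ++ [[[0] ++ i.getD 0 [], i.getD 1 [], i.getD 2 []]]) result
    let result := (get_binbin_ranges (min + mid + 1) max).foldl
      (fun r i => r ++ [[[1] ++ i.getD 0 [], i.getD 1 [], i.getD 2 []]]) result
    result
termination_by (max - min).toNat
decreasing_by all_goals omega

-- ===== PORT B =====
-- the while-stack loop of Source B; frame = (lo, hi, path); list.pop() pops the head here
-- because pushes prepend (last-pushed is popped first, exactly as in Source B).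
def pvBLoop (stack : List (Int × Int × List Int)) (result : List (List (List Int))) :
    List (List (List Int)) :=
  match stack with
  | [] => result
  | (lo, hi, path) :: rest =>
    if _h1 : hi ≤ lo then pvBLoop rest result
    else if _h2 : hi - lo ≤ 1 then pvBLoop rest (result ++ [[path, [lo, lo], [hi, hi]]])
    else
      let mid := (hi - lo) / 2
      pvBLoop ((lo, lo + mid, path ++ [0]) :: (lo + mid + 1, hi, path ++ [1]) :: rest)
        (result ++ [[path, [lo, lo + mid], [lo + mid + 1, hi]]])
termination_by (stack.map (fun f => 2 * (f.2.1 - f.1).toNat + 1)).sum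
decreasing_by all_goals (simp only [List.map_cons, List.sum_cons]; omega)

def get_binbin_ranges_alt (min : Int) (max : Int) : List (List (List Int)) :=
  pvBLoop [(min, max, [])] []

-- ===== PRECONDITION & SPEC =====
def Spec_get_binbin_ranges (min : Int) (max : Int) (out : List (List (List Int))) : Prop := out = get_binbin_ranges_alt min max
instance (min : Int) (max : Int) (out : List (List (List Int))) : Decidable (Spec_get_binbin_ranges min max out) := by unfold Spec_get_binbin_ranges; infer_instance

-- ===== CLAIM (what is proved, stated in full; the proofs are below) =====
def Claim_equal_get_binbin_ranges : Prop := ∀ (min : Int) (max : Int), Dom_get_binbin_ranges min max → Spec_get_binbin_ranges min max (get_binbin_ranges min max)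

-- ===== LEMMAS AND PROOFS =====

-- prefix a path segment onto an emitted triple
def pvPref (p : List Int) (e : List (List Int)) : List (List Int) :=
  (p ++ e.headD []) :: e.tail

-- every entry A emits is a triple [path, r, s]
lemma pvShape (n : Nat) : ∀ lo hi : Int, (hi - lo).toNat ≤ n →
    ∀ e ∈ get_binbin_ranges lo hi, ∃ p r s, e = [p, r, s] := by
  induction n with
  | zero =>
    intro lo hi hn e he
    rw [get_binbin_ranges] at he
    simp only [show hi ≤ lo by omega, dite_true] at he
    exact absurd he (List.not_mem_nil)
  | succ n ih =>
    intro lo hi hn e he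
    rw [get_binbin_ranges] at he
    by_cases h1 : hi ≤ lo
    · simp [h1] at he
    by_cases h2 : hi - lo ≤ 1
    · simp [h1, h2] at he
      exact ⟨[], [lo, lo], [hi, hi], he⟩
    simp only [h1, h2, dite_false] at he
    rw [PySem.List.foldl_append_singleton_eq_map, PySem.List.foldl_append_singleton_eq_map] at he
    have hmid : lo ≤ lo + (hi - lo) / 2 ∧ lo + (hi - lo) / 2 + 1 ≤ hi := by omega
    simp only [List.append_assoc, List.mem_append, List.mem_singleton, List.mem_map] at he
    rcases he with he | ⟨i, hi', rfl⟩ | ⟨i, hi', rfl⟩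
    · exact ⟨[], _, _, he⟩
    · obtain ⟨p, r, s, rfl⟩ := ih lo (lo + (hi - lo) / 2) (by omega) i hi'
      exact ⟨[0] ++ p, r, s, by simp⟩
    · obtain ⟨p, r, s, rfl⟩ := ih (lo + (hi - lo) / 2 + 1) hi (by omega) i hi'
      exact ⟨[1] ++ p, r, s, by simp⟩

-- processing one frame of B's stack appends the p-prefixed entries of A's result
lemma pvBLoop_cons (n : Nat) : ∀ lo hi : Int, (hi - lo).toNat ≤ n →
    ∀ (p : List Int) (st : List (Int × Int × List Int)) (acc : List (List (List Int))),
    pvBLoop ((lo, hi, p) :: st) acc =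
      pvBLoop st (acc ++ (get_binbin_ranges lo hi).map (pvPref p)) := by
  induction n with
  | zero =>
    intro lo hi hn p st acc
    rw [pvBLoop, get_binbin_ranges]
    simp [show hi ≤ lo by omega]
  | succ n ih =>
    intro lo hi hn p st acc
    rw [pvBLoop, get_binbin_ranges]
    by_cases h1 : hi ≤ lo
    · simp [h1]
    by_cases h2 : hi - lo ≤ 1
    · simp [h1, h2, pvPref]
    simp only [h1, h2, dite_false]
    rw [ih lo (lo + (hi - lo) / 2) (by omega),
        ih (lo + (hi - lo) / 2 + 1) hi (by omega)]
    congr 1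
    rw [PySem.List.foldl_append_singleton_eq_map, PySem.List.foldl_append_singleton_eq_map]
    simp only [List.append_assoc, List.map_append, List.map_map]
    congr 2
    · simp [pvPref]
    congr 1
    · apply List.map_congr_left
      intro i hi'
      obtain ⟨q, r, s, rfl⟩ := pvShape ((lo + (hi - lo) / 2) - lo).toNat lo _ le_rfl i hi'
      simp [pvPref]
    · apply List.map_congr_left
      intro i hi'
      obtain ⟨q, r, s, rfl⟩ := pvShape (hi - (lo + (hi - lo) / 2 + 1)).toNat _ hi le_rfl i hi'
      simp [pvPref]

-- ===== VERDICT (by name: the statement is the Claim_ definition above) =====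
theorem get_binbin_ranges_spec : Claim_equal_get_binbin_ranges := by
  intro mn mx _
  unfold Spec_get_binbin_ranges get_binbin_ranges_alt
  rw [pvBLoop_cons (mx - mn).toNat mn mx le_rfl, pvBLoop]
  simp only [List.nil_append]
  symm
  conv_rhs => rw [← List.map_id (get_binbin_ranges mn mx)]
  apply List.map_congr_left
  intro e he
  obtain ⟨p, r, s, rfl⟩ := pvShape (mx - mn).toNat mn mx le_rfl e he
  simp [pvPref]
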